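-- pv_equiv track=rewrite | github.com/yolorollo/docs | src/backend/core/utils.py | filter_descendants
-- ===== SOURCE A (Python) =====
-- def filter_descendants(paths, root_paths, skip_sorting=False):
--     """
--     Filters paths to keep only those that are descendants of any path in root_paths.
--
--     A path is considered a descendant of a root path if it starts with the root path.
--     If `skip_sorting` is not set to True, the function will sort both lists before
--     processing because both `paths` and `root_paths` need to be in lexicographic order
--     before going through the algorithm.
--
--     Args:
--         paths (iterable of str): List of paths to be filtered.
--         root_paths (iterable of str): List of paths to check as potential prefixes.
--         skip_sorting (bool): If True, assumes both `paths` and `root_paths` are already sorted.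
--
--     Returns:
--         list of str: A list of sorted paths that are descendants of any path in `root_paths`.
--     """
--     results = []
--     i = 0
--     n = len(root_paths)
--
--     if not skip_sorting:
--         paths.sort()
--         root_paths.sort()
--
--     for path in paths:
--         # Try to find a matching prefix in the sorted accessible paths
--         while i < n:
--             if path.startswith(root_paths[i]):
--                 results.append(path)
--                 break
--             if root_paths[i] < path:
--                 i += 1
--             else:
--                 # If paths[i] > path, no need to keep searching
--                 break
--     return results
-- ===== SOURCE B (Python) =====
-- def filter_descendants(paths, root_paths, skip_sorting=False):
--     if not skip_sorting:
--         paths.sort()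
--         root_paths.sort()
--     return [path for path in paths
--             if any(path.startswith(root) for root in root_paths)]
-- ===== Notes on version B (the rewrite author's own statement) =====
-- stated objective: simpler
-- what changed: Replaces the stateful two-pointer merge over the two sorted lists with a plain comprehension that keeps each path iff it starts with any root (the guarded in-place sorts are kept).
-- outside the precondition, e.g. on filter_descendants(['b', 'a'], ['a'], True): A returns [], B returns ['a']
import Mathlib
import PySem

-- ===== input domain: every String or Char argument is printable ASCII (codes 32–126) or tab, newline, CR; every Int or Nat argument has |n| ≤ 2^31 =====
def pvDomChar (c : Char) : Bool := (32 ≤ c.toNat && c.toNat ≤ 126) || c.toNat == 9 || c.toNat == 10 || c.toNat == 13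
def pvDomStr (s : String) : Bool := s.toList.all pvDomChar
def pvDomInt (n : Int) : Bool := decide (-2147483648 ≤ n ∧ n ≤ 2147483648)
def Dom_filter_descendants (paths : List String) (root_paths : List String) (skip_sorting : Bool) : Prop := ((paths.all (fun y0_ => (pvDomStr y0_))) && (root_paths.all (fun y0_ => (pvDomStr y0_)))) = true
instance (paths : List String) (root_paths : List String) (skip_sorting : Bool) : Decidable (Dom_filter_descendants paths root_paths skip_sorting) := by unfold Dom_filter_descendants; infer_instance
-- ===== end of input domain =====

-- ===== PORT A =====
-- B replaces A's two-pointer merge by a plain any-prefix filter; return-value equivalence only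
-- (both A and B sort `paths` and `root_paths` in place when skip_sorting is false).

-- inner `while i < n: ...` loop of A, over the state (results, i)
def pvAWhile (path : String) (root_paths : List String) (n : Nat) (i : Nat)
    (results : List String) : List String × Nat :=
  if _h : i < n then
    if PySem.Str.startswith path (root_paths.getD i "") then (results ++ [path], i)
    else if root_paths.getD i "" < path then pvAWhile path root_paths n (i + 1) results
    else (results, i)
  else (results, i)
termination_by n - i

-- outer `for path in paths:` loop of A
def pvALoop (root_paths : List String) (n : Nat) :
    List String → Nat → List String → List String
  | [], _, results => results
  | p :: ps, i, results =>
      pvALoop root_paths n ps (pvAWhile p root_paths n i results).2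
        (pvAWhile p root_paths n i results).1

def filter_descendants (paths : List String) (root_paths : List String)
    (skip_sorting : Bool) : List String :=
  let n := root_paths.length
  let paths' := if skip_sorting then paths else PySem.List.sorted paths (fun x => x) false
  let root_paths' := if skip_sorting then root_paths else PySem.List.sorted root_paths (fun x => x) false
  pvALoop root_paths' n paths' 0 []

-- ===== PORT B =====
def filter_descendants_alt (paths : List String) (root_paths : List String)
    (skip_sorting : Bool) : List String :=
  let paths' := if skip_sorting then paths else PySem.List.sorted paths (fun x => x) false
  let root_paths' := if skip_sorting then root_paths else PySem.List.sorted root_paths (fun x => x) false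
  paths'.filter (fun p => root_paths'.any (fun r => PySem.Str.startswith p r))

-- ===== PRECONDITION & SPEC =====
-- Pre_ excludes only the calls that violate A's documented assumption (skip_sorting=True promises
-- both lists are already sorted): there A's monotone-pointer output is an order-dependent accident
-- that no caller could rely on, while B keeps every path with a matching root.
def Pre_filter_descendants (paths : List String) (root_paths : List String)
    (skip_sorting : Bool) : Prop :=
  skip_sorting = true → (paths.Pairwise (fun a b => a.toList ≤ b.toList) ∧
    root_paths.Pairwise (fun a b => a.toList ≤ b.toList))
instance (paths : List String) (root_paths : List String) (skip_sorting : Bool) :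
    Decidable (Pre_filter_descendants paths root_paths skip_sorting) := by
  unfold Pre_filter_descendants; infer_instance

def pvWitness_filter_descendants : List String × List String × Bool :=
  (["a/b", "a/c", "b"], ["a/"], true)

def Spec_filter_descendants (paths : List String) (root_paths : List String) (skip_sorting : Bool) (out : List String) : Prop := out = filter_descendants_alt paths root_paths skip_sorting
instance (paths : List String) (root_paths : List String) (skip_sorting : Bool) (out : List String) : Decidable (Spec_filter_descendants paths root_paths skip_sorting out) := by unfold Spec_filter_descendants; infer_instance

-- ===== CLAIM (what is proved, stated in full; the proofs are below) =====
def Claim_equal_filter_descendants : Prop := ∀ (paths : List String) (root_paths : List String) (skip_sorting : Bool), Dom_filter_descendants paths root_paths skip_sorting → Pre_filter_descendants paths root_paths skip_sorting → Spec_filter_descendants paths root_paths skip_sorting (filter_descendants paths root_paths skip_sorting)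

-- ===== LEMMAS AND PROOFS =====

-- If r is a prefix of p then p is never lexicographically below r.
theorem pvNotLexOfPrefix {r p : List Char} (h : r <+: p) : ¬ List.Lex (· < ·) p r := by
  obtain ⟨t, rfl⟩ := h
  induction r with
  | nil => intro hl; cases hl
  | cons a as ih =>
      intro hl
      cases hl with
      | rel h' => exact lt_irrefl _ h'
      | cons h' => exact ih h'

-- A prefix of p is ≤ p (on strings).
theorem pvLeOfPrefix {r p : String} (h : r.toList <+: p.toList) : r ≤ p := by
  rw [String.le_iff_toList_le]
  refine not_lt.mp (fun hlt => pvNotLexOfPrefix h ?_)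
  exact hlt

-- Extending r by any suffix stays lexicographically below p when r < p and r is not a prefix of p.
theorem pvLexAppend {r p : List Char} (t : List Char) (hnp : ¬ r <+: p)
    (hlt : List.Lex (· < ·) r p) : List.Lex (· < ·) (r ++ t) p := by
  induction hlt with
  | nil => exact absurd List.nil_prefix hnp
  | rel h' => exact List.Lex.rel h'
  | cons h' ih =>
      exact List.Lex.cons (ih (fun hp => hnp (by simpa using hp)))

-- Any string starting with r is below p when r < p and r is not a prefix of p.
theorem pvLtOfPrefixOfLt {r p q : String} (hnp : ¬ r.toList <+: p.toList) (hlt : r < p)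
    (hq : r.toList <+: q.toList) : q < p := by
  obtain ⟨t, ht⟩ := hq
  rw [String.lt_iff_toList_lt] at hlt ⊢
  rw [← ht]
  exact pvLexAppend t hnp hlt

theorem pvStartswithIff (p r : String) :
    PySem.Str.startswith p r = true ↔ r.toList <+: p.toList := by
  rw [PySem.Str.startswith_eq]
  exact PySem.Chars.startswith_iff _ _

-- invariant carried by A's pointer: every root strictly left of i is below p and not a prefix of p
def pvInv (root_paths : List String) (i : Nat) (p : String) : Prop :=
  ∀ j < i, root_paths.getD j "" < p ∧ ¬ (root_paths.getD j "").toList <+: p.toList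

theorem pvInv_mono {root_paths : List String} {i : Nat} {p p' : String}
    (h : pvInv root_paths i p) (hle : p ≤ p') : pvInv root_paths i p' := by
  intro j hj
  refine ⟨lt_of_lt_of_le (h j hj).1 hle, fun hpre => ?_⟩
  exact absurd (pvLtOfPrefixOfLt (h j hj).2 (h j hj).1 hpre) (not_lt.mpr hle)

theorem pvAWhile_spec (p : String) (roots : List String) (hs : roots.Pairwise (· ≤ ·)) :
    ∀ k i, roots.length - i = k → i ≤ roots.length → pvInv roots i p →
    ∃ i', i' ≤ roots.length ∧ pvInv roots i' p ∧
      (((∃ r ∈ roots, r.toList <+: p.toList) ∧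
          ∀ acc, pvAWhile p roots roots.length i acc = (acc ++ [p], i')) ∨
       ((∀ r ∈ roots, ¬ r.toList <+: p.toList) ∧
          ∀ acc, pvAWhile p roots roots.length i acc = (acc, i'))) := by
  intro k
  induction k with
  | zero =>
      intro i hk hi hinv
      have hei : i = roots.length := by omega
      refine ⟨i, hi, hinv, Or.inr ⟨?_, ?_⟩⟩
      · intro r hr
        obtain ⟨j, hj, rfl⟩ := List.mem_iff_getElem.mp hr
        have hji : j < i := by omega
        have := (hinv j hji).2
        rwa [List.getD_eq_getElem roots "" hj] at this
      · intro acc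
        rw [pvAWhile]
        simp [hei]
  | succ k IH =>
      intro i hk hi hinv
      have hilt : i < roots.length := by omega
      by_cases hsw : PySem.Str.startswith p (roots.getD i "") = true
      · refine ⟨i, hi, hinv, Or.inl ⟨⟨roots.getD i "", ?_, ?_⟩, ?_⟩⟩
        · rw [List.getD_eq_getElem roots "" hilt]; exact List.getElem_mem hilt
        · exact (pvStartswithIff _ _).mp hsw
        · intro acc
          rw [pvAWhile, dif_pos hilt, if_pos hsw]
      · by_cases hlt : roots.getD i "" < p
        · have hinv' : pvInv roots (i + 1) p := by
            intro j hj
            by_cases hji : j < i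
            · exact hinv j hji
            · have : j = i := by omega
              subst this
              exact ⟨hlt, fun hpre => hsw ((pvStartswithIff _ _).mpr hpre)⟩
          obtain ⟨i', hi', hinvi', hcase⟩ := IH (i + 1) (by omega) (by omega) hinv'
          refine ⟨i', hi', hinvi', ?_⟩
          rcases hcase with ⟨hex, heq⟩ | ⟨hall, heq⟩
          · refine Or.inl ⟨hex, fun acc => ?_⟩
            rw [pvAWhile, dif_pos hilt, if_neg (by simpa using hsw), if_pos hlt]
            exact heq acc
          · refine Or.inr ⟨hall, fun acc => ?_⟩
            rw [pvAWhile, dif_pos hilt, if_neg (by simpa using hsw), if_pos hlt]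
            exact heq acc
        · refine ⟨i, hi, hinv, Or.inr ⟨?_, ?_⟩⟩
          · intro r hr
            obtain ⟨j, hj, rfl⟩ := List.mem_iff_getElem.mp hr
            by_cases hji : j < i
            · have := (hinv j hji).2
              rwa [List.getD_eq_getElem roots "" hj] at this
            · intro hpre
              have hij : roots[i] ≤ roots[j] := by
                rcases Nat.lt_or_ge i j with hij' | hij'
                · exact List.pairwise_iff_getElem.mp hs i j hilt hj hij'
                · have : i = j := by omega
                  subst this; exact le_refl _
              have hrp : roots[j] ≤ p := pvLeOfPrefix hpre
              have hpi : p ≤ roots.getD i "" := not_lt.mp hlt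
              rw [List.getD_eq_getElem roots "" hilt] at hpi
              have h1 : roots[i] = roots[j] := le_antisymm hij (le_trans hrp hpi)
              apply hsw
              rw [List.getD_eq_getElem roots "" hilt, h1]
              exact (pvStartswithIff _ _).mpr hpre
          · intro acc
            rw [pvAWhile, dif_pos hilt, if_neg (by simpa using hsw), if_neg hlt]

theorem pvALoop_spec (roots : List String) (hs : roots.Pairwise (· ≤ ·)) :
    ∀ (paths : List String) (i : Nat) (acc : List String),
      paths.Pairwise (· ≤ ·) → i ≤ roots.length → (∀ p ∈ paths, pvInv roots i p) →
      pvALoop roots roots.length paths i acc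
        = acc ++ paths.filter (fun p => roots.any (fun r => PySem.Str.startswith p r)) := by
  intro paths
  induction paths with
  | nil => intro i acc _ _ _; simp [pvALoop]
  | cons p ps ih =>
      intro i acc hp hi hinv
      obtain ⟨i', hi', hinv', hcase⟩ :=
        pvAWhile_spec p roots hs (roots.length - i) i rfl hi (hinv p List.mem_cons_self)
      have hps : ps.Pairwise (· ≤ ·) := (List.pairwise_cons.mp hp).2
      have hple : ∀ p' ∈ ps, p ≤ p' := (List.pairwise_cons.mp hp).1
      have hinvps : ∀ p' ∈ ps, pvInv roots i' p' :=
        fun p' h' => pvInv_mono hinv' (hple p' h')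
      rcases hcase with ⟨⟨r, hr, hpre⟩, heq⟩ | ⟨hnone, heq⟩
      · have hany : roots.any (fun r => PySem.Str.startswith p r) = true := by
          rw [List.any_eq_true]
          exact ⟨r, hr, (pvStartswithIff p r).mpr hpre⟩
        rw [pvALoop, heq acc, ih i' (acc ++ [p]) hps hi' hinvps, List.filter_cons,
          if_pos hany]
        simp
      · have hany : roots.any (fun r => PySem.Str.startswith p r) = false := by
          rw [List.any_eq_false]
          intro r hr
          exact fun hsw => hnone r hr ((pvStartswithIff p r).mp hsw)
        rw [pvALoop, heq acc, ih i' acc hps hi' hinvps, List.filter_cons]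
        simp only [hany, Bool.false_eq_true, if_false]

theorem pvMain (paths roots : List String) (hpp : paths.Pairwise (· ≤ ·))
    (hrp : roots.Pairwise (· ≤ ·)) :
    pvALoop roots roots.length paths 0 []
      = paths.filter (fun p => roots.any (fun r => PySem.Str.startswith p r)) := by
  rw [pvALoop_spec roots hrp paths 0 [] hpp (Nat.zero_le _)
    (fun p _ => fun j hj => absurd hj (Nat.not_lt_zero j))]
  simp

theorem pvSortedPairwise (xs : List String) :
    (PySem.List.sorted xs (fun x => x) false).Pairwise (· ≤ ·) := by
  have := PySem.List.sorted_pairwise (xs := xs) (key := fun x : String => x) 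
  simpa using this

-- ===== VERDICT (by name: the statement is the Claim_ definition above) =====
theorem filter_descendants_spec : Claim_equal_filter_descendants := by
  intro paths root_paths skip_sorting _hdom hpre
  unfold Spec_filter_descendants filter_descendants filter_descendants_alt
  cases skip_sorting with
  | false =>
      simp only [Bool.false_eq_true, if_false]
      rw [show root_paths.length = (PySem.List.sorted root_paths (fun x => x) false).length by
        simp [PySem.List.length_sorted]]
      exact pvMain _ _ (pvSortedPairwise paths) (pvSortedPairwise root_paths)
  | true =>
      simp only [if_true]
      obtain ⟨hpp, hrp⟩ := hpre rfl
      exact pvMain _ _ (hpp.imp fun h => String.le_iff_toList_le.mpr h)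
        (hrp.imp fun h => String.le_iff_toList_le.mpr h)
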